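-- pv_equiv track=rewrite | github.com/SkyErnest/legal_utils | utils.py | look_up_laws
-- ===== SOURCE A (Python) =====
-- def look_up_laws(law):
--     def look_up(law):
--         if 102 <= law <= 113:
--             return 0
--         if 114 <= law <= 139:
--             return 1
--         if 140 <= law <= 231:
--             return 2
--         if 232 <= law <= 262:
--             return 3
--         if 263 <= law <= 276:
--             return 4
--         if 277 <= law <= 367:
--             return 5
--         if 268 <= law <= 381:
--             return 6
--         if 382 <= law <= 396:
--             return 7
--         if 397 <= law <= 419:
--             return 8
--         if 420 <= law <= 451:
--             return 9
--
--     res = []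
--     for each in law:
--         res.append(look_up(each))
--     return res
-- ===== SOURCE B (Python) =====
-- # Bands are contiguous from 102 to 451 (band 6's overlap only effectively covers
-- # 368-381 under first-match), so a range check plus binary search over the band
-- # start points replaces A's cascade of ten interval tests.
-- def look_up_laws(law):
--     starts = [102, 114, 140, 232, 263, 277, 368, 382, 397, 420]
--
--     def band(n):
--         if n < 102 or n > 451:
--             return None
--         lo, hi = 0, len(starts)
--         while lo + 1 < hi:
--             mid = (lo + hi) // 2
--             if starts[mid] <= n:
--                 lo = mid
--             else:
--                 hi = mid
--         return lo
--
--     return [band(n) for n in law]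
-- ===== Notes on version B (the rewrite author's own statement) =====
-- stated objective: alternative
-- what changed: Replaces the cascade of ten interval tests with a range check plus a binary search over the ten band start points (the bands are contiguous on 102..451 under first-match).
import Mathlib
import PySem

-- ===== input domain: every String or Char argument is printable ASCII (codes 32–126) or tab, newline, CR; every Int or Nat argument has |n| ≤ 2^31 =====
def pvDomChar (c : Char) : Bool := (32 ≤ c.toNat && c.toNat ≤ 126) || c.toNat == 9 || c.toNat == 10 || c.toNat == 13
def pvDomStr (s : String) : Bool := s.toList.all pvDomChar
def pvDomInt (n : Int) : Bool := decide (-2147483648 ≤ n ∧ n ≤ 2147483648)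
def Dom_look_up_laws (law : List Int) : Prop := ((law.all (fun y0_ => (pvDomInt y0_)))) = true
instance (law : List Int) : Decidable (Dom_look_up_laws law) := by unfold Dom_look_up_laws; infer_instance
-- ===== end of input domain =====

-- B replaces A's cascade of ten interval tests by a range check plus a binary
-- search over the band start points (objective: alternative; same observable values).

-- ===== PORT A =====
-- inner helper look_up: the cascade of interval tests; falls through to None
def pvLookUp (law : Int) : Option Int :=
  if 102 ≤ law ∧ law ≤ 113 then some 0
  else if 114 ≤ law ∧ law ≤ 139 then some 1
  else if 140 ≤ law ∧ law ≤ 231 then some 2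
  else if 232 ≤ law ∧ law ≤ 262 then some 3
  else if 263 ≤ law ∧ law ≤ 276 then some 4
  else if 277 ≤ law ∧ law ≤ 367 then some 5
  else if 268 ≤ law ∧ law ≤ 381 then some 6
  else if 382 ≤ law ∧ law ≤ 396 then some 7
  else if 397 ≤ law ∧ law ≤ 419 then some 8
  else if 420 ≤ law ∧ law ≤ 451 then some 9
  else none

def look_up_laws (law : List Int) : List (Option Int) :=
  law.foldl (fun res each => res ++ [pvLookUp each]) []

-- ===== PORT B =====
def pvStarts : List Int := [102, 114, 140, 232, 263, 277, 368, 382, 397, 420]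

-- the while-loop of B's binary search; starts[mid] is always in range here,
-- so the .getD 0 default never fires; fuel (hi-lo).toNat only makes the
-- recursion structural, it never cuts the loop short (the gap shrinks each step)
def pvBandLoopGo (n lo hi : Int) : Nat -> Int
  | 0 => lo
  | fuel+1 =>
    if lo + 1 < hi then
      let mid := PySem.Int.floordiv (lo + hi) 2
      if (PySem.List.pyGet? pvStarts mid).getD 0 <= n then pvBandLoopGo n mid hi fuel
      else pvBandLoopGo n lo mid fuel
    else lo

def pvBandLoop (n lo hi : Int) : Int := pvBandLoopGo n lo hi (hi - lo).toNat

def pvBand (n : Int) : Option Int :=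
  if n < 102 ∨ 451 < n then none
  else some (pvBandLoop n 0 10)

def look_up_laws_alt (law : List Int) : List (Option Int) :=
  law.map pvBand

-- ===== PRECONDITION & SPEC =====
def Spec_look_up_laws (law : List Int) (out : List (Option Int)) : Prop := out = look_up_laws_alt law
instance (law : List Int) (out : List (Option Int)) : Decidable (Spec_look_up_laws law out) := by unfold Spec_look_up_laws; infer_instance

-- ===== CLAIM (what is proved, stated in full; the proofs are below) =====
def Claim_equal_look_up_laws : Prop := ∀ (law : List Int), Dom_look_up_laws law → Spec_look_up_laws law (look_up_laws law)

-- ===== LEMMAS AND PROOFS =====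

set_option maxHeartbeats 2000000 in
theorem pvBand_eq (n : Int) : pvLookUp n = pvBand n := by
  by_cases h : n < 102 ∨ 451 < n
  · unfold pvLookUp pvBand
    rw [if_pos h]
    split_ifs <;> first | rfl | omega
  · push Not at h
    obtain ⟨h1, h2⟩ := h
    interval_cases n <;> decide

theorem look_up_laws_spec : Claim_equal_look_up_laws := by
  intro law _
  show look_up_laws law = look_up_laws_alt law
  unfold look_up_laws look_up_laws_alt
  rw [PySem.List.foldl_append_singleton_eq_map]
  simp [pvBand_eq]
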